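-- pv_equiv track=rewrite | github.com/1600012865/patent-transform | extract.py | keywords_processing
-- ===== SOURCE A (Python) =====
-- def word_check(word):
--
--     w = word.lower()
--     flag = True if len(w) > 0 else False
--     for c in w:
--         if not (c >= 'a' and c <= 'z') and c != "'" and c!= "-":
--             flag = False
--             break
--     return flag
--
-- def keywords_processing(line, function_words):
--     res = []
--     des_line = line.split(' ')
--     for w in des_line:
--         w = w.lower().strip(',')
--         if word_check(w) and not w in function_words:
--             res.append(w)
--     return res
-- ===== SOURCE B (Python) =====
-- def _emit(cur, stop, res):
--     w = ''.join(cur).strip(',')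
--     if w and all(('a' <= c <= 'z') or c == "'" or c == '-' for c in w) and w not in stop:
--         res.append(w)
--
-- def keywords_processing(line, function_words):
--     stop = set(function_words)
--     res = []
--     cur = []
--     for c in line.lower():
--         if c == ' ':
--             _emit(cur, stop, res)
--             cur = []
--         else:
--             cur.append(c)
--     _emit(cur, stop, res)
--     return res
-- ===== Notes on version B (the rewrite author's own statement) =====
-- stated objective: alternative
-- what changed: Replaces split-into-words followed by a per-word validation helper with a single character-level streaming state machine over line.lower(): tokens are accumulated char by char and flushed at each space, with stopwords checked against a set built once.
import Mathlib
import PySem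

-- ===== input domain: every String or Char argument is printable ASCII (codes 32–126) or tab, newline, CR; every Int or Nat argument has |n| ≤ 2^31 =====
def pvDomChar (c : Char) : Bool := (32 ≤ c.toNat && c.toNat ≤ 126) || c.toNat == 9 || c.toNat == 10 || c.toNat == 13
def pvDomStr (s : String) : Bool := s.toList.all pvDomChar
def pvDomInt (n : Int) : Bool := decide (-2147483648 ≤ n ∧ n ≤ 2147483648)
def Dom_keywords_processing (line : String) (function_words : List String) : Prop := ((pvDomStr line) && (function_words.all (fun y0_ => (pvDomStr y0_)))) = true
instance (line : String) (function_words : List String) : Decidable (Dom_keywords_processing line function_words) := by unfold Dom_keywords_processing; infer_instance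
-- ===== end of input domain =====

-- B replaces split-into-words plus a per-word validation helper with one character-level
-- streaming state machine over the lowered line, flushing a token at each space (alternative).

-- ===== PORT A =====
-- 'for c in w: if not (c >= 'a' and c <= 'z') and c != "'" and c != "-": flag = False; break'
def pvWordCheckLoop (cs : List Char) (flag : Bool) : Bool :=
  match cs with
  | [] => flag
  | c :: rest =>
    if (!(decide ('a' ≤ c) && decide (c ≤ 'z')) && (c != '\'') && (c != '-')) then false
    else pvWordCheckLoop rest flag

def word_check (word : String) : Bool :=
  let w := PySem.Str.lower word
  let flag := if 0 < PySem.Str.len w then true else false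
  pvWordCheckLoop w.toList flag

def keywords_processing (line : String) (function_words : List String) : List String :=
  let des_line := (PySem.Str.split? line " ").getD []  -- sep " " is nonempty: split? never raises here
  des_line.foldl (fun res w0 =>
    let w := PySem.Str.stripChars (PySem.Str.lower w0) ","
    if word_check w && !(function_words.contains w) then res ++ [w] else res) []

-- ===== PORT B =====
-- _emit: strip commas, test every char a-z/'/-, skip stopwords, append
def pvEmit (stop : PySem.Set String) (cur : List Char) (res : List String) : List String :=
  let w := PySem.Chars.stripChars cur ",".toList
  if !w.isEmpty &&
      w.all (fun c => (decide ('a' ≤ c) && decide (c ≤ 'z')) || c == '\'' || c == '-') &&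
      !(stop.contains (String.ofList w)) then
    res ++ [String.ofList w]
  else res

-- the for-loop over line.lower(): accumulate the current token, flush at each space
def pvScan (stop : PySem.Set String) (l : List Char) (cur : List Char) (res : List String) : List String :=
  match l with
  | [] => pvEmit stop cur res
  | c :: rest =>
    if c == ' ' then pvScan stop rest [] (pvEmit stop cur res)
    else pvScan stop rest (cur ++ [c]) res

def keywords_processing_alt (line : String) (function_words : List String) : List String :=
  let stop : PySem.Set String := PySem.Set.ofList function_words
  pvScan stop (PySem.Str.lower line).toList [] []

-- ===== PRECONDITION & SPEC =====
def Spec_keywords_processing (line : String) (function_words : List String) (out : List String) : Prop := out = keywords_processing_alt line function_words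
instance (line : String) (function_words : List String) (out : List String) : Decidable (Spec_keywords_processing line function_words out) := by unfold Spec_keywords_processing; infer_instance

-- ===== CLAIM (what is proved, stated in full; the proofs are below) =====
def Claim_equal_keywords_processing : Prop := ∀ (line : String) (function_words : List String), Dom_keywords_processing line function_words → Spec_keywords_processing line function_words (keywords_processing line function_words)

-- ===== LEMMAS AND PROOFS =====

-- Python split(' ') on a char list: single-space separator, empty pieces kept
def pvSplitSp : List Char → List (List Char)
  | [] => [[]]
  | c :: cs =>
    if c = ' ' then [] :: pvSplitSp cs
    else match pvSplitSp cs with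
      | [] => [[c]]
      | t :: ts => (c :: t) :: ts

-- prepend a pending prefix onto the first piece
def pvConsHead (p : List Char) : List (List Char) → List (List Char)
  | [] => [p]
  | t :: ts => (p ++ t) :: ts

theorem pvSplitSp_ne_nil (cs : List Char) : pvSplitSp cs ≠ [] := by
  cases cs with
  | nil => simp [pvSplitSp]
  | cons c rest =>
    rw [pvSplitSp]
    split
    · simp
    · rcases h : pvSplitSp rest with _ | ⟨t, ts⟩ <;> simp

theorem pvSplitOnGo_eq (fuel : Nat) :
    ∀ (l cur : List Char) (acc : List (List Char)), l.length < fuel →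
      PySem.Chars.splitOn.go [' '] fuel l cur acc =
        acc.reverse ++ pvConsHead cur.reverse (pvSplitSp l) := by
  induction fuel with
  | zero => intro l cur acc h; omega
  | succ fuel ih =>
    intro l cur acc h
    cases l with
    | nil =>
      rw [PySem.Chars.splitOn.go]
      simp [pvSplitSp, pvConsHead]
      omega
    | cons c rest =>
      rw [PySem.Chars.splitOn.go]
      by_cases hc : c = ' '
      · subst hc
        have hp : [' '].isPrefixOf (' ' :: rest) = true := by simp [List.isPrefixOf]
        rw [if_pos hp]
        simp only [List.length_singleton, List.drop_succ_cons, List.drop_zero]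
        rw [ih rest [] (cur.reverse :: acc) (by simpa using Nat.lt_of_succ_lt_succ h)]
        rcases hs : pvSplitSp rest with _ | ⟨t, ts⟩
        · exact absurd hs (pvSplitSp_ne_nil rest)
        · simp only [pvSplitSp, hs, pvConsHead, List.reverse_nil, List.reverse_cons,
            List.nil_append]
          simp
      · have hp : [' '].isPrefixOf (c :: rest) = false := by
          simp only [List.isPrefixOf]
          simp [Ne.symm hc]
        rw [if_neg (by simp [hp])]
        rw [ih rest (c :: cur) acc (by simpa using Nat.lt_of_succ_lt_succ h)]
        rcases hs : pvSplitSp rest with _ | ⟨t, ts⟩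
        · exact absurd hs (pvSplitSp_ne_nil rest)
        · simp [pvSplitSp, hc, hs, pvConsHead]

theorem pvSplitOn_eq (cs : List Char) :
    PySem.Chars.splitOn cs [' '] = pvSplitSp cs := by
  rw [PySem.Chars.splitOn, pvSplitOnGo_eq (cs.length + 1) cs [] [] (by omega)]
  rcases hs : pvSplitSp cs with _ | ⟨t, ts⟩
  · exact absurd hs (pvSplitSp_ne_nil cs)
  · simp [pvConsHead]


-- lowerChar maps nothing to ' ' except ' ' itself
theorem pvLowerChar_eq_space_iff (c : Char) :
    PySem.Chars.lowerChar c = ' ' ↔ c = ' ' := by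
  simp only [PySem.Chars.lowerChar, PySem.Chars.isupper, Bool.and_eq_true, decide_eq_true_eq]
  split_ifs with h1
  · constructor
    · intro hv
      exfalso
      obtain ⟨ha, hb⟩ := h1
      have hge : 65 ≤ c.toNat := Fin.mk_le_mk.mp ha
      have hle : c.toNat ≤ 90 := Fin.mk_le_mk.mp hb
      have hvn : (Char.ofNat (c.toNat + 32)).toNat = c.toNat + 32 := by
        rw [Char.toNat_ofNat]
        have : (c.toNat + 32).isValidChar := Or.inl (by omega)
        simp [this]
      have : (Char.ofNat (c.toNat + 32)).toNat = (' ' : Char).toNat := by rw [hv]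
      rw [hvn] at this
      simp at this
      omega
    · intro hv
      exfalso
      subst hv
      exact absurd h1 (by decide)
  · exact Iff.rfl

-- split commutes with per-char lowering
theorem pvSplitSp_lower (cs : List Char) :
    pvSplitSp (PySem.Chars.lower cs) = (pvSplitSp cs).map PySem.Chars.lower := by
  induction cs with
  | nil => simp [PySem.Chars.lower, pvSplitSp]
  | cons c rest ih =>
    rw [PySem.Chars.lower, List.map_cons, pvSplitSp, pvSplitSp]
    by_cases hc : c = ' '
    · rw [if_pos ((pvLowerChar_eq_space_iff c).mpr hc), if_pos hc]
      rw [← PySem.Chars.lower, ih]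
      simp [PySem.Chars.lower]
    · rw [if_neg (fun h => hc ((pvLowerChar_eq_space_iff c).mp h)), if_neg hc]
      rw [← PySem.Chars.lower, ih]
      rcases hs : pvSplitSp rest with _ | ⟨t, ts⟩
      · exact absurd hs (pvSplitSp_ne_nil rest)
      · simp [PySem.Chars.lower]

-- the char class of A's loop condition, as one Bool
def pvGoodA (c : Char) : Bool := (decide ('a' ≤ c) && decide (c ≤ 'z')) || c == '\'' || c == '-'

theorem pvBad_eq_not_goodA (c : Char) :
    (!(decide ('a' ≤ c) && decide (c ≤ 'z')) && (c != '\'') && (c != '-')) = !pvGoodA c := by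
  simp [pvGoodA, Bool.not_or, Bool.and_assoc, bne]

theorem pvWordCheckLoop_eq (cs : List Char) (flag : Bool) :
    pvWordCheckLoop cs flag = (flag && cs.all pvGoodA) := by
  induction cs with
  | nil => simp [pvWordCheckLoop]
  | cons c rest ih =>
    rw [pvWordCheckLoop, pvBad_eq_not_goodA]
    by_cases h : pvGoodA c
    · simp [h, ih]
    · simp only [Bool.not_eq_true] at h
      simp [h]


theorem pvLowerChar_idem (c : Char) :
    PySem.Chars.lowerChar (PySem.Chars.lowerChar c) = PySem.Chars.lowerChar c := by
  simp only [PySem.Chars.lowerChar, PySem.Chars.isupper, Bool.and_eq_true, decide_eq_true_eq]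
  split_ifs with h1 h2 <;> try rfl
  exfalso
  obtain ⟨ha, hb⟩ := h1
  obtain ⟨h2a, h2b⟩ := h2
  have hle : c.toNat ≤ 90 := Fin.mk_le_mk.mp hb
  have hge : 65 ≤ c.toNat := Fin.mk_le_mk.mp ha
  have hv : (Char.ofNat (c.toNat + 32)).toNat = c.toNat + 32 := by
    rw [Char.toNat_ofNat]
    have : (c.toNat + 32).isValidChar := Or.inl (by omega)
    simp [this]
  have h3 : (Char.ofNat (c.toNat + 32)).toNat ≤ 90 := Fin.mk_le_mk.mp h2b
  rw [hv] at h3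
  omega

theorem pvMem_stripChars {c : Char} {s chars : List Char}
    (h : c ∈ PySem.Chars.stripChars s chars) : c ∈ s := by
  simp only [PySem.Chars.stripChars, List.mem_reverse] at h
  have h1 := (List.dropWhile_sublist _).mem h
  rw [List.mem_reverse] at h1
  exact (List.dropWhile_sublist _).mem h1

-- stripped chunks of an already-lowered list are fixed by lowering
theorem pvLower_strip_lower (t : List Char) :
    PySem.Chars.lower (PySem.Chars.stripChars (PySem.Chars.lower t) ",".toList) =
      PySem.Chars.stripChars (PySem.Chars.lower t) ",".toList := by
  rw [PySem.Chars.lower]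
  have hfix : ∀ c ∈ PySem.Chars.stripChars (PySem.Chars.lower t) ",".toList,
      PySem.Chars.lowerChar c = id c := by
    intro c hc
    have h1 : c ∈ PySem.Chars.lower t := pvMem_stripChars hc
    simp only [PySem.Chars.lower, List.mem_map] at h1
    obtain ⟨c0, _, rfl⟩ := h1
    simp [pvLowerChar_idem]
  rw [List.map_congr_left hfix, List.map_id]

-- B's streaming loop equals a fold of _emit over the split pieces (pending prefix cur)
theorem pvScan_eq (stop : PySem.Set String) (l : List Char) :
    ∀ (cur : List Char) (res : List String),
      pvScan stop l cur res =
        (pvConsHead cur (pvSplitSp l)).foldl (fun r t => pvEmit stop t r) res := by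
  induction l with
  | nil => intro cur res; simp [pvScan, pvSplitSp, pvConsHead]
  | cons c rest ih =>
    intro cur res
    rw [pvScan, pvSplitSp]
    by_cases hc : c = ' '
    · rw [if_pos (by simp [hc]), if_pos hc, ih]
      rcases hs : pvSplitSp rest with _ | ⟨t, ts⟩
      · exact absurd hs (pvSplitSp_ne_nil rest)
      · simp [pvConsHead]
    · rw [if_neg (by simp [hc]), if_neg hc, ih]
      rcases hs : pvSplitSp rest with _ | ⟨t, ts⟩
      · exact absurd hs (pvSplitSp_ne_nil rest)
      · simp [pvConsHead]

theorem pvFoldl_ext {α β : Type} (f g : β → α → β) (h : ∀ r t, f r t = g r t) :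
    ∀ (L : List α) (r : β), L.foldl f r = L.foldl g r := by
  intro L
  induction L with
  | nil => intro r; rfl
  | cons x xs ih => intro r; rw [List.foldl_cons, List.foldl_cons, h, ih]

-- per-piece agreement: A's step on the raw piece = B's _emit on the lowered piece
theorem pvStep_eq (function_words : List String) (t : List Char) (r : List String) :
    (let w := PySem.Str.stripChars (PySem.Str.lower (String.ofList t)) ","
     if word_check w && !(function_words.contains w) then r ++ [w] else r) =
    pvEmit (PySem.Set.ofList function_words) (PySem.Chars.lower t) r := by
  have hw : (PySem.Str.stripChars (PySem.Str.lower (String.ofList t)) ",").toList =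
      PySem.Chars.stripChars (PySem.Chars.lower t) ",".toList := by
    simp [PySem.Str.toList_stripChars, PySem.Str.toList_lower]
  have hwstr : PySem.Str.stripChars (PySem.Str.lower (String.ofList t)) "," =
      String.ofList (PySem.Chars.stripChars (PySem.Chars.lower t) ",".toList) := by
    apply String.toList_inj.mp
    simp [hw]
  rw [pvEmit]
  simp only [hwstr]
  have hcheck : word_check (String.ofList (PySem.Chars.stripChars (PySem.Chars.lower t) ",".toList)) =
      (!(PySem.Chars.stripChars (PySem.Chars.lower t) ",".toList).isEmpty &&
        (PySem.Chars.stripChars (PySem.Chars.lower t) ",".toList).all pvGoodA) := by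
    rw [word_check]
    have hlow : PySem.Str.lower (String.ofList (PySem.Chars.stripChars (PySem.Chars.lower t) ",".toList)) =
        String.ofList (PySem.Chars.stripChars (PySem.Chars.lower t) ",".toList) := by
      apply String.toList_inj.mp
      simpa [PySem.Str.toList_lower] using pvLower_strip_lower t
    simp only [hlow, pvWordCheckLoop_eq, PySem.Str.len_eq]
    rcases hs : (PySem.Chars.stripChars (PySem.Chars.lower t) ",".toList) with _ | ⟨c, cs⟩ <;>
      simp
  have hstop : (PySem.Set.ofList function_words).contains
        (String.ofList (PySem.Chars.stripChars (PySem.Chars.lower t) ",".toList)) =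
      function_words.contains (String.ofList (PySem.Chars.stripChars (PySem.Chars.lower t) ",".toList)) := by
    rw [PySem.Set.contains, List.contains_eq_mem, List.contains_eq_mem]
    exact decide_eq_decide.mpr (PySem.Set.mem_ofList function_words _)
  rw [hcheck, hstop]
  have hall : (PySem.Chars.stripChars (PySem.Chars.lower t) ",".toList).all pvGoodA =
      (PySem.Chars.stripChars (PySem.Chars.lower t) ",".toList).all
        (fun c => (decide ('a' ≤ c) && decide (c ≤ 'z')) || c == '\'' || c == '-') := rfl
  rw [hall]

-- ===== VERDICT (by name: the statement is the Claim_ definition above) =====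
theorem keywords_processing_spec : Claim_equal_keywords_processing := by
  intro line function_words _
  unfold Spec_keywords_processing
  rw [keywords_processing, keywords_processing_alt]
  simp only [PySem.Str.split?, PySem.Chars.split?]
  have hsep : (" " : String).toList = [' '] := rfl
  rw [hsep, pvSplitOn_eq]
  rw [pvScan_eq]
  have hnil : pvConsHead [] (pvSplitSp (PySem.Str.lower line).toList) =
      pvSplitSp (PySem.Str.lower line).toList := by
    rcases hs : pvSplitSp (PySem.Str.lower line).toList with _ | ⟨t, ts⟩
    · exact absurd hs (pvSplitSp_ne_nil _)
    · simp [pvConsHead]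
  rw [hnil, PySem.Str.toList_lower, pvSplitSp_lower]
  simp only [List.isEmpty_cons, Bool.false_eq_true, if_false, Option.map_some,
    Option.getD_some, List.foldl_map]
  refine pvFoldl_ext _ _ (fun r t => ?_) _ _
  have hst := pvStep_eq function_words t r
  simp only at hst
  simpa using hst
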